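-- pv_equiv track=rewrite | github.com/AmoghGOkade/Notes | Python/Graphs/Minimum_Cost_Spanning_Trees_Kruskals_adj_list.py | kruskal_fast
-- ===== SOURCE A (Python) =====
-- def kruskal_fast(Wlist):
--     edges = []
--     mcst_edges = []
--     for u in Wlist.keys():
--         '''edges.extend([(d, u, v) for (v, d) in Wlist[u]])'''
--         for (v, d) in Wlist[u]:
--             edges.append((d, u, v))
--
--     component = {}
--     members = {}  #key - component name, value - list of vertices belonging to that component
--     size = {}   #component name: no. of vertices belonging to it
--     for i in Wlist.keys():
--         component[i] = i
--         members[i] = [i]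
--         size[i] = 1
--
--     for (u, v, d) in edges:
--         if component[u] != component[v]:
--             mcst_edges.append((u, v, d))
--             if size[component[u]] > size[component[v]]:
--                 c_old = component[v]
--                 c_new = component[u]
--             else:
--                 c_old = component[u]
--                 c_new = component[v]
--
--             for i in members[c_old]:
--                 component[i] = c_new
--                 members[c_new].append(i)    #need not destroy c_old data of members and size, because it is never being used
--                 size[c_new]+=1
--
--     return mcst_edges
-- ===== SOURCE B (Python) =====
-- def kruskal_fast(Wlist):
--     # Same (buggy-tuple-order) edge generation as the original, but the
--     # component bookkeeping drops the members/size dicts: one label dict,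
--     # rebuilt by a comprehension on each merge.
--     edges = [(d, u, v) for u in Wlist.keys() for (v, d) in Wlist[u]]
--     comp = {i: i for i in Wlist.keys()}
--     mcst_edges = []
--     for (u, v, d) in edges:
--         cu = comp[u]
--         cv = comp[v]
--         if cu != cv:
--             mcst_edges.append((u, v, d))
--             comp = {i: (cv if c == cu else c) for (i, c) in comp.items()}
--     return mcst_edges
-- ===== Notes on version B (the rewrite author's own statement) =====
-- stated objective: simpler
-- what changed: B keeps A's edge generation (including the weight-as-vertex tuple unpacking) but replaces the three-dict component bookkeeping (component + members lists + size with union-by-size relabelling of the smaller side) by a single label dict rebuilt with one comprehension per merge; the recorded edge list is independent of which label survives a merge.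
import Mathlib
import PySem

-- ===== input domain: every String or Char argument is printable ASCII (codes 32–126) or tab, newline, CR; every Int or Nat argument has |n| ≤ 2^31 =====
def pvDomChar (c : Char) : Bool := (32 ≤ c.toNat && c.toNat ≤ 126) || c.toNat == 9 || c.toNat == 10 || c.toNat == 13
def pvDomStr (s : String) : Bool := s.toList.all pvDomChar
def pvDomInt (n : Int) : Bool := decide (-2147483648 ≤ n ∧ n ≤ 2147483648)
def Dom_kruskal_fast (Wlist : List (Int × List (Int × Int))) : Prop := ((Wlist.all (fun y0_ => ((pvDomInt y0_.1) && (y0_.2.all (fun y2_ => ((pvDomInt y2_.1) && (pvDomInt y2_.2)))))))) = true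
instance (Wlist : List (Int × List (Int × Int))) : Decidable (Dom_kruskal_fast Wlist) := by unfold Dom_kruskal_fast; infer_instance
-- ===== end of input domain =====

-- B replaces A's component/members/size bookkeeping by a single label dict rebuilt per merge
-- (simpler decomposition, same return value; no mutation of the argument in either version).

-- ===== PORT A =====
-- body of A's inner relabel loop: component[i] = c_new; members[c_new].append(i); size[c_new] += 1
def pvInnerA (cnew : Int)
    (t : PySem.Dict Int Int × PySem.Dict Int (List Int) × PySem.Dict Int Int) (i : Int) :
    PySem.Dict Int Int × PySem.Dict Int (List Int) × PySem.Dict Int Int :=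
  (t.1.insert i cnew, t.2.1.modify cnew [] (fun l => l ++ [i]), t.2.2.modify cnew 0 (fun n => n + 1))

-- body of A's main loop over edges; state = (component, members, size, mcst_edges)
def pvStepA
    (st : PySem.Dict Int Int × PySem.Dict Int (List Int) × PySem.Dict Int Int × List (Int × Int × Int))
    (e : Int × Int × Int) :
    PySem.Dict Int Int × PySem.Dict Int (List Int) × PySem.Dict Int Int × List (Int × Int × Int) :=
  let comp := st.1
  let mem := st.2.1
  let sz := st.2.2.1
  let out := st.2.2.2
  if comp.getD e.1 0 ≠ comp.getD e.2.1 0 then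
    let cs : Int × Int :=
      if sz.getD (comp.getD e.1 0) 0 > sz.getD (comp.getD e.2.1 0) 0
      then (comp.getD e.2.1 0, comp.getD e.1 0)
      else (comp.getD e.1 0, comp.getD e.2.1 0)
    let r := (mem.getD cs.1 []).foldl (pvInnerA cs.2) (comp, mem, sz)
    (r.1, r.2.1, r.2.2, out ++ [e])
  else st

def kruskal_fast (Wlist : List (Int × List (Int × Int))) : List (Int × Int × Int) :=
  let W := PySem.Dict.ofList Wlist
  let edges := W.keys.foldl
      (fun es u => (W.getD u []).foldl (fun es2 p => es2 ++ [(p.2, u, p.1)]) es) []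
  let init := W.keys.foldl
      (fun s i => (s.1.insert i i, s.2.1.insert i [i], s.2.2.insert i (1 : Int)))
      ((PySem.Dict.empty, PySem.Dict.empty, PySem.Dict.empty) :
        PySem.Dict Int Int × PySem.Dict Int (List Int) × PySem.Dict Int Int)
  (edges.foldl pvStepA (init.1, init.2.1, init.2.2, [])).2.2.2

-- ===== PORT B =====
-- the dict comprehension {i: (cv if c == cu else c) for (i, c) in comp.items()}
def pvRelabel (cu cv : Int) (d : PySem.Dict Int Int) : PySem.Dict Int Int :=
  d.items.foldl (fun c p => c.insert p.1 (if p.2 = cu then cv else p.2)) PySem.Dict.empty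

-- body of B's loop over edges; state = (comp, mcst_edges)
def pvStepB (st : PySem.Dict Int Int × List (Int × Int × Int)) (e : Int × Int × Int) :
    PySem.Dict Int Int × List (Int × Int × Int) :=
  if st.1.getD e.1 0 ≠ st.1.getD e.2.1 0 then
    (pvRelabel (st.1.getD e.1 0) (st.1.getD e.2.1 0) st.1, st.2 ++ [e])
  else st

def kruskal_fast_alt (Wlist : List (Int × List (Int × Int))) : List (Int × Int × Int) :=
  let W := PySem.Dict.ofList Wlist
  let edges := W.keys.flatMap (fun u => (W.getD u []).map (fun p => (p.2, u, p.1)))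
  let comp := W.keys.foldl (fun c i => c.insert i i)
      (PySem.Dict.empty : PySem.Dict Int Int)
  (edges.foldl pvStepB (comp, [])).2

-- ===== PRECONDITION & SPEC =====
-- Pre_ excludes exactly the inputs on which the Python A raises KeyError: the buggy unpacking
-- looks up component[weight], so every edge weight must itself be a vertex (a key of the dict).
def Pre_kruskal_fast (Wlist : List (Int × List (Int × Int))) : Prop :=
  ∀ u ∈ (PySem.Dict.ofList Wlist).keys,
    ∀ q ∈ (PySem.Dict.ofList Wlist).getD u ([] : List (Int × Int)),
      q.2 ∈ (PySem.Dict.ofList Wlist).keys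

instance (Wlist : List (Int × List (Int × Int))) : Decidable (Pre_kruskal_fast Wlist) := by
  unfold Pre_kruskal_fast; infer_instance

def pvWitness_kruskal_fast : (List (Int × List (Int × Int))) := [(0, [(1, 0)]), (1, [])]

def Spec_kruskal_fast (Wlist : List (Int × List (Int × Int))) (out : List (Int × Int × Int)) : Prop := out = kruskal_fast_alt Wlist
instance (Wlist : List (Int × List (Int × Int))) (out : List (Int × Int × Int)) : Decidable (Spec_kruskal_fast Wlist out) := by unfold Spec_kruskal_fast; infer_instance

-- ===== CLAIM (what is proved, stated in full; the proofs are below) =====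
def Claim_equal_kruskal_fast : Prop := ∀ (Wlist : List (Int × List (Int × Int))), Dom_kruskal_fast Wlist → Pre_kruskal_fast Wlist → Spec_kruskal_fast Wlist (kruskal_fast Wlist)

-- ===== LEMMAS AND PROOFS =====

-- the simulation invariant: same key set on B's side, A's labels are keys, A's member lists
-- describe A's components exactly, and the two label dicts induce the same partition of the keys
def pvInv (K : List Int) (cA : PySem.Dict Int Int) (mem : PySem.Dict Int (List Int))
    (cB : PySem.Dict Int Int) : Prop :=
  cB.keys = K ∧
  (∀ x ∈ K, cA.getD x 0 ∈ K) ∧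
  (∀ y ∈ K, ∀ x : Int, (x ∈ mem.getD (cA.getD y 0) [] ↔ x ∈ K ∧ cA.getD x 0 = cA.getD y 0)) ∧
  (∀ x ∈ K, ∀ y ∈ K, (cA.getD x 0 = cA.getD y 0 ↔ cB.getD x 0 = cB.getD y 0))

lemma pv_getD_foldl_insert_fun {ν : Type} (f : Int → ν) (l : List Int)
    (acc : PySem.Dict Int ν) (x : Int) (d0 : ν) :
    (l.foldl (fun c i => c.insert i (f i)) acc).getD x d0
      = if x ∈ l then f x else acc.getD x d0 := by
  induction l generalizing acc with
  | nil => simp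
  | cons i t ih =>
      simp only [List.foldl_cons, ih, PySem.Dict.getD_insert, List.mem_cons]
      by_cases hx : x ∈ t
      · simp [hx]
      · by_cases hxi : x = i <;> simp [hx, hxi]

lemma pv_foldl_prod3 {α β γ δ : Type} (f1 : α → δ → α) (f2 : β → δ → β) (f3 : γ → δ → γ)
    (l : List δ) (a : α) (b : β) (c : γ) :
    l.foldl (fun s i => (f1 s.1 i, f2 s.2.1 i, f3 s.2.2 i)) (a, b, c)
      = (l.foldl f1 a, l.foldl f2 b, l.foldl f3 c) := by
  induction l generalizing a b c with
  | nil => rfl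
  | cons i t ih => simp only [List.foldl_cons]; exact ih _ _ _

lemma pv_items_foldl_insert_id (K : List Int) (hK : K.Nodup) :
    (K.foldl (fun c i => c.insert i i) (PySem.Dict.empty : PySem.Dict Int Int)).items
      = K.map (fun i => (i, i)) := by
  have h := PySem.Dict.items_foldl_insert_fresh K (fun i => i) (fun i => i)
      (PySem.Dict.empty : PySem.Dict Int Int) (by simp) (by simpa using hK)
  simpa using h

lemma pv_keys_comp0 (K : List Int) (hK : K.Nodup) :
    (K.foldl (fun c i => c.insert i i) (PySem.Dict.empty : PySem.Dict Int Int)).keys = K := by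
  simp only [PySem.Dict.keys, pv_items_foldl_insert_id K hK]
  simp [Function.comp_def]

lemma pv_relabel_items (cu cv : Int) (d : PySem.Dict Int Int) (hnd : d.keys.Nodup) :
    (pvRelabel cu cv d).items
      = d.keys.map (fun k => (k, if d.getD k 0 = cu then cv else d.getD k 0)) := by
  unfold pvRelabel
  have h := PySem.Dict.items_foldl_insert_fresh d.items (fun p => p.1)
      (fun p => if p.2 = cu then cv else p.2) (PySem.Dict.empty : PySem.Dict Int Int)
      (by simp) (by simpa [PySem.Dict.keys] using hnd)
  rw [h]
  rw [PySem.Dict.items_eq_map_keys d hnd 0]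
  rw [show (PySem.Dict.empty : PySem.Dict Int Int).items = [] from rfl]
  simp [List.map_map, Function.comp_def]

lemma pv_relabel_keys (cu cv : Int) (d : PySem.Dict Int Int) (hnd : d.keys.Nodup) :
    (pvRelabel cu cv d).keys = d.keys := by
  simp only [PySem.Dict.keys, pv_relabel_items cu cv d hnd]
  simp [Function.comp_def]

lemma pv_relabel_getD (cu cv : Int) (d : PySem.Dict Int Int) (hnd : d.keys.Nodup)
    (x : Int) (hx : x ∈ d.keys) :
    (pvRelabel cu cv d).getD x 0 = if d.getD x 0 = cu then cv else d.getD x 0 := by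
  apply PySem.Dict.getD_of_mem_items
  · rw [pv_relabel_items cu cv d hnd]
    exact List.mem_map.2 ⟨x, hx, rfl⟩
  · rw [pv_relabel_keys cu cv d hnd]; exact hnd

lemma pv_innerA_comp (cnew : Int) (l : List Int) (comp : PySem.Dict Int Int)
    (mem : PySem.Dict Int (List Int)) (sz : PySem.Dict Int Int) (x : Int) :
    ((l.foldl (pvInnerA cnew) (comp, mem, sz)).1).getD x 0
      = if x ∈ l then cnew else comp.getD x 0 := by
  induction l generalizing comp mem sz with
  | nil => simp
  | cons i t ih =>
      simp only [List.foldl_cons, pvInnerA]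
      rw [ih]
      simp only [PySem.Dict.getD_insert, List.mem_cons]
      by_cases hx : x ∈ t
      · simp [hx]
      · by_cases hxi : x = i <;> simp [hx, hxi]

lemma pv_innerA_mem (cnew : Int) (l : List Int) (comp : PySem.Dict Int Int)
    (mem : PySem.Dict Int (List Int)) (sz : PySem.Dict Int Int) (c : Int) :
    ((l.foldl (pvInnerA cnew) (comp, mem, sz)).2.1).getD c []
      = if c = cnew then mem.getD cnew [] ++ l else mem.getD c [] := by
  induction l generalizing comp mem sz with
  | nil => by_cases hc : c = cnew <;> simp [hc]
  | cons i t ih =>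
      simp only [List.foldl_cons, pvInnerA]
      rw [ih]
      simp only [PySem.Dict.getD_modify]
      by_cases hc : c = cnew <;> simp [hc]

lemma pv_merge_eq_iff (a' b' : Int) (h : a' ≠ b') (s t : Int) :
    ((if s = a' then b' else s) = (if t = a' then b' else t))
      ↔ (s = t ∨ ((s = a' ∨ s = b') ∧ (t = a' ∨ t = b'))) := by
  split_ifs with h1 h2 h2 <;> constructor <;> intro hh <;> omega

set_option maxHeartbeats 1000000 in
lemma pv_merge_inv (K : List Int) (hK : K.Nodup) (u v : Int) (hu : u ∈ K) (hv : v ∈ K)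
    (cA : PySem.Dict Int Int) (mem : PySem.Dict Int (List Int)) (sz : PySem.Dict Int Int)
    (cB : PySem.Dict Int Int) (hI : pvInv K cA mem cB)
    (hg : cA.getD u 0 ≠ cA.getD v 0) (cold cnew : Int)
    (hcs : (cold = cA.getD u 0 ∧ cnew = cA.getD v 0) ∨ (cold = cA.getD v 0 ∧ cnew = cA.getD u 0)) :
    pvInv K ((mem.getD cold []).foldl (pvInnerA cnew) (cA, mem, sz)).1
            ((mem.getD cold []).foldl (pvInnerA cnew) (cA, mem, sz)).2.1
            (pvRelabel (cB.getD u 0) (cB.getD v 0) cB) := by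
  obtain ⟨hBk, hlab, hex, hpart⟩ := hI
  have hndB : cB.keys.Nodup := by rw [hBk]; exact hK
  have hpq : cB.getD u 0 ≠ cB.getD v 0 := fun h => hg ((hpart u hu v hv).2 h)
  have hcoldne : cold ≠ cnew := by
    rcases hcs with ⟨h1, h2⟩ | ⟨h1, h2⟩ <;> subst h1 <;> subst h2
    · exact hg
    · exact fun h => hg h.symm
  have hexcold : ∀ x : Int, x ∈ mem.getD cold [] ↔ x ∈ K ∧ cA.getD x 0 = cold := by
    rcases hcs with ⟨h1, _⟩ | ⟨h1, _⟩ <;> subst h1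
    · exact fun x => hex u hu x
    · exact fun x => hex v hv x
  have hexcnew : ∀ x : Int, x ∈ mem.getD cnew [] ↔ x ∈ K ∧ cA.getD x 0 = cnew := by
    rcases hcs with ⟨_, h2⟩ | ⟨_, h2⟩ <;> subst h2
    · exact fun x => hex v hv x
    · exact fun x => hex u hu x
  have hcnewK : cnew ∈ K := by
    rcases hcs with ⟨_, h2⟩ | ⟨_, h2⟩ <;> subst h2
    · exact hlab v hv
    · exact hlab u hu
  -- value of the new A-side labels on keys
  have hval : ∀ z ∈ K,
      ((mem.getD cold []).foldl (pvInnerA cnew) (cA, mem, sz)).1.getD z 0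
        = if cA.getD z 0 = cold then cnew else cA.getD z 0 := by
    intro z hz
    rw [pv_innerA_comp]
    by_cases h : cA.getD z 0 = cold
    · rw [if_pos ((hexcold z).2 ⟨hz, h⟩), if_pos h]
    · rw [if_neg (fun hm => h ((hexcold z).1 hm).2), if_neg h]
  -- value of the new member lists
  have hMcnew : ((mem.getD cold []).foldl (pvInnerA cnew) (cA, mem, sz)).2.1.getD cnew []
      = mem.getD cnew [] ++ mem.getD cold [] := by
    rw [pv_innerA_mem, if_pos rfl]
  have hMother : ∀ c : Int, c ≠ cnew →
      ((mem.getD cold []).foldl (pvInnerA cnew) (cA, mem, sz)).2.1.getD c []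
        = mem.getD c [] := by
    intro c hc
    rw [pv_innerA_mem, if_neg hc]
  -- value of the new B-side labels on keys
  have hB' : ∀ x ∈ K,
      (pvRelabel (cB.getD u 0) (cB.getD v 0) cB).getD x 0
        = if cB.getD x 0 = cB.getD u 0 then cB.getD v 0 else cB.getD x 0 := by
    intro x hx
    exact pv_relabel_getD _ _ cB hndB x (by rw [hBk]; exact hx)
  refine ⟨by rw [pv_relabel_keys _ _ cB hndB]; exact hBk, ?_, ?_, ?_⟩
  · -- labels stay keys
    intro x hx
    rw [hval x hx]
    by_cases h : cA.getD x 0 = cold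
    · rw [if_pos h]; exact hcnewK
    · rw [if_neg h]; exact hlab x hx
  · -- member lists describe the new components exactly
    intro y hy x
    by_cases hyc : cA.getD y 0 = cold
    · have hLy : ((mem.getD cold []).foldl (pvInnerA cnew) (cA, mem, sz)).1.getD y 0 = cnew := by
        rw [hval y hy, if_pos hyc]
      rw [hLy, hMcnew]
      constructor
      · intro hxm
        rcases List.mem_append.1 hxm with hm | hm
        · obtain ⟨hxK, hxv⟩ := (hexcnew x).1 hm
          refine ⟨hxK, ?_⟩
          rw [hval x hxK, if_neg (fun hh => hcoldne (hh.symm.trans hxv))]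
          exact hxv
        · obtain ⟨hxK, hxv⟩ := (hexcold x).1 hm
          exact ⟨hxK, by rw [hval x hxK, if_pos hxv]⟩
      · rintro ⟨hxK, hxv⟩
        rw [hval x hxK] at hxv
        by_cases hxc : cA.getD x 0 = cold
        · exact List.mem_append.2 (Or.inr ((hexcold x).2 ⟨hxK, hxc⟩))
        · rw [if_neg hxc] at hxv
          exact List.mem_append.2 (Or.inl ((hexcnew x).2 ⟨hxK, hxv⟩))
    · have hLy : ((mem.getD cold []).foldl (pvInnerA cnew) (cA, mem, sz)).1.getD y 0
          = cA.getD y 0 := by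
        rw [hval y hy, if_neg hyc]
      rw [hLy]
      by_cases hyn : cA.getD y 0 = cnew
      · rw [hyn, hMcnew]
        constructor
        · intro hxm
          rcases List.mem_append.1 hxm with hm | hm
          · obtain ⟨hxK, hxv⟩ := (hexcnew x).1 hm
            refine ⟨hxK, ?_⟩
            rw [hval x hxK, if_neg (fun hh => hcoldne (hh.symm.trans hxv))]
            exact hxv
          · obtain ⟨hxK, hxv⟩ := (hexcold x).1 hm
            exact ⟨hxK, by rw [hval x hxK, if_pos hxv]⟩
        · rintro ⟨hxK, hxv⟩
          rw [hval x hxK] at hxv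
          by_cases hxc : cA.getD x 0 = cold
          · exact List.mem_append.2 (Or.inr ((hexcold x).2 ⟨hxK, hxc⟩))
          · rw [if_neg hxc] at hxv
            exact List.mem_append.2 (Or.inl ((hexcnew x).2 ⟨hxK, hxv⟩))
      · rw [hMother _ hyn, hex y hy x]
        constructor
        · rintro ⟨hxK, hxv⟩
          refine ⟨hxK, ?_⟩
          rw [hval x hxK, if_neg (fun hh => hyc (hxv.symm.trans hh))]
          exact hxv
        · rintro ⟨hxK, hxv⟩
          rw [hval x hxK] at hxv
          by_cases hxc : cA.getD x 0 = cold
          · rw [if_pos hxc] at hxv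
            exact absurd hxv.symm hyn
          · rw [if_neg hxc] at hxv
            exact ⟨hxK, hxv⟩
  · -- same partition
    intro x hx y hy
    rw [hval x hx, hval y hy, hB' x hx, hB' y hy]
    rw [pv_merge_eq_iff cold cnew hcoldne, pv_merge_eq_iff _ _ hpq]
    have h1 : cA.getD x 0 = cA.getD u 0 ↔ cB.getD x 0 = cB.getD u 0 := hpart x hx u hu
    have h2 : cA.getD x 0 = cA.getD v 0 ↔ cB.getD x 0 = cB.getD v 0 := hpart x hx v hv
    have h3 : cA.getD y 0 = cA.getD u 0 ↔ cB.getD y 0 = cB.getD u 0 := hpart y hy u hu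
    have h4 : cA.getD y 0 = cA.getD v 0 ↔ cB.getD y 0 = cB.getD v 0 := hpart y hy v hv
    have h5 : cA.getD x 0 = cA.getD y 0 ↔ cB.getD x 0 = cB.getD y 0 := hpart x hx y hy
    clear hval hMcnew hMother hB' hexcold hexcnew hex hlab hBk hcnewK
    rcases hcs with ⟨hc1, hc2⟩ | ⟨hc1, hc2⟩ <;> rw [hc1, hc2, h1, h2, h3, h4, h5] <;> tauto

set_option maxHeartbeats 1000000 in
lemma pv_sim (K : List Int) (hK : K.Nodup) (edges : List (Int × Int × Int))
    (hE : ∀ e ∈ edges, e.1 ∈ K ∧ e.2.1 ∈ K)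
    (cA : PySem.Dict Int Int) (mem : PySem.Dict Int (List Int)) (sz : PySem.Dict Int Int)
    (cB : PySem.Dict Int Int) (out : List (Int × Int × Int)) (hI : pvInv K cA mem cB) :
    (edges.foldl pvStepA (cA, mem, sz, out)).2.2.2 = (edges.foldl pvStepB (cB, out)).2 := by
  induction edges generalizing cA mem sz cB out with
  | nil => rfl
  | cons e es ih =>
      have hu : e.1 ∈ K := (hE e List.mem_cons_self).1
      have hv : e.2.1 ∈ K := (hE e List.mem_cons_self).2
      have hE' : ∀ e' ∈ es, e'.1 ∈ K ∧ e'.2.1 ∈ K := fun e' he' => hE e' (List.mem_cons_of_mem e he')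
      obtain ⟨hBk, hlab, hex, hpart⟩ := hI
      have hguard : cA.getD e.1 0 = cA.getD e.2.1 0 ↔ cB.getD e.1 0 = cB.getD e.2.1 0 :=
        hpart e.1 hu e.2.1 hv
      simp only [List.foldl_cons]
      by_cases hg : cA.getD e.1 0 = cA.getD e.2.1 0
      · have hgB : cB.getD e.1 0 = cB.getD e.2.1 0 := hguard.1 hg
        have hA : pvStepA (cA, mem, sz, out) e = (cA, mem, sz, out) := by
          simp [pvStepA, hg]
        have hB : pvStepB (cB, out) e = (cB, out) := by
          simp [pvStepB, hgB]
        rw [hA, hB]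
        exact ih hE' cA mem sz cB out ⟨hBk, hlab, hex, hpart⟩
      · have hgB : ¬ cB.getD e.1 0 = cB.getD e.2.1 0 := fun h => hg (hguard.2 h)
        have hB : pvStepB (cB, out) e
            = (pvRelabel (cB.getD e.1 0) (cB.getD e.2.1 0) cB, out ++ [e]) := by
          simp [pvStepB, hgB]
        by_cases hsz : sz.getD (cA.getD e.1 0) 0 > sz.getD (cA.getD e.2.1 0) 0
        · have hA : pvStepA (cA, mem, sz, out) e
              = (((mem.getD (cA.getD e.2.1 0) []).foldl (pvInnerA (cA.getD e.1 0)) (cA, mem, sz)).1,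
                 ((mem.getD (cA.getD e.2.1 0) []).foldl (pvInnerA (cA.getD e.1 0)) (cA, mem, sz)).2.1,
                 ((mem.getD (cA.getD e.2.1 0) []).foldl (pvInnerA (cA.getD e.1 0)) (cA, mem, sz)).2.2,
                 out ++ [e]) := by
            simp [pvStepA, hg, hsz]
          rw [hA, hB]
          have hI' := pv_merge_inv K hK e.1 e.2.1 hu hv cA mem sz cB
            ⟨hBk, hlab, hex, hpart⟩ hg (cA.getD e.2.1 0) (cA.getD e.1 0) (Or.inr ⟨rfl, rfl⟩)
          exact ih hE' _ _ _ _ _ hI'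
        · have hA : pvStepA (cA, mem, sz, out) e
              = (((mem.getD (cA.getD e.1 0) []).foldl (pvInnerA (cA.getD e.2.1 0)) (cA, mem, sz)).1,
                 ((mem.getD (cA.getD e.1 0) []).foldl (pvInnerA (cA.getD e.2.1 0)) (cA, mem, sz)).2.1,
                 ((mem.getD (cA.getD e.1 0) []).foldl (pvInnerA (cA.getD e.2.1 0)) (cA, mem, sz)).2.2,
                 out ++ [e]) := by
            simp [pvStepA, hg, hsz]
          rw [hA, hB]
          have hI' := pv_merge_inv K hK e.1 e.2.1 hu hv cA mem sz cB
            ⟨hBk, hlab, hex, hpart⟩ hg (cA.getD e.1 0) (cA.getD e.2.1 0) (Or.inl ⟨rfl, rfl⟩)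
          exact ih hE' _ _ _ _ _ hI'

lemma pv_edges_eq (W : PySem.Dict Int (List (Int × Int))) :
    W.keys.foldl
      (fun es u => (W.getD u []).foldl (fun es2 p => es2 ++ [(p.2, u, p.1)]) es) []
      = W.keys.flatMap (fun u => (W.getD u []).map (fun p => (p.2, u, p.1))) := by
  suffices h : ∀ (L : List Int) (acc : List (Int × Int × Int)),
      L.foldl (fun es u => (W.getD u []).foldl (fun es2 p => es2 ++ [(p.2, u, p.1)]) es) acc
        = acc ++ L.flatMap (fun u => (W.getD u []).map (fun p => (p.2, u, p.1))) by
    simpa using h W.keys []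
  intro L
  induction L with
  | nil => simp
  | cons u t ih =>
      intro acc
      simp only [List.foldl_cons, List.flatMap_cons, ih]
      rw [PySem.List.foldl_append_singleton_eq_map (fun p => ((p.2, u, p.1) : Int × Int × Int))
        (W.getD u []) acc]
      simp [List.append_assoc]

lemma pv_init_inv (K : List Int) (hK : K.Nodup) :
    pvInv K (K.foldl (fun c i => c.insert i i) PySem.Dict.empty)
            (K.foldl (fun m i => m.insert i [i]) PySem.Dict.empty)
            (K.foldl (fun c i => c.insert i i) PySem.Dict.empty) := by
  have hA : ∀ x : Int,
      (K.foldl (fun c i => c.insert i i) (PySem.Dict.empty : PySem.Dict Int Int)).getD x 0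
        = if x ∈ K then x else 0 := by
    intro x
    have := pv_getD_foldl_insert_fun (fun i => i) K PySem.Dict.empty x 0
    simpa using this
  have hM : ∀ c : Int,
      (K.foldl (fun m i => m.insert i [i]) (PySem.Dict.empty : PySem.Dict Int (List Int))).getD c []
        = if c ∈ K then [c] else [] := by
    intro c
    have := pv_getD_foldl_insert_fun (fun i => [i]) K PySem.Dict.empty c []
    simpa using this
  refine ⟨pv_keys_comp0 K hK, ?_, ?_, ?_⟩
  · intro x hx; rw [hA x, if_pos hx]; exact hx
  · intro y hy x
    rw [hA y, if_pos hy, hM y, if_pos hy]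
    constructor
    · intro hx
      have hxy : x = y := by simpa using hx
      subst hxy
      exact ⟨hy, by rw [hA x, if_pos hy]⟩
    · rintro ⟨hxK, hxv⟩
      rw [hA x, if_pos hxK] at hxv
      simp [hxv]
  · intro x hx y hy
    rw [hA x, hA y, if_pos hx, if_pos hy]

-- ===== VERDICT (by name: the statement is the Claim_ definition above) =====
theorem kruskal_fast_spec : Claim_equal_kruskal_fast := by
  intro Wlist _hDom hPre
  unfold Spec_kruskal_fast
  simp only [kruskal_fast, kruskal_fast_alt]
  rw [pv_edges_eq (PySem.Dict.ofList Wlist)]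
  rw [pv_foldl_prod3 (fun (c : PySem.Dict Int Int) i => c.insert i i)
      (fun (m : PySem.Dict Int (List Int)) i => m.insert i [i])
      (fun (s : PySem.Dict Int Int) i => s.insert i (1 : Int))
      (PySem.Dict.ofList Wlist).keys PySem.Dict.empty PySem.Dict.empty PySem.Dict.empty]
  apply pv_sim (PySem.Dict.ofList Wlist).keys (PySem.Dict.nodup_keys_ofList Wlist)
  · intro e he
    obtain ⟨u, hu, he2⟩ := List.mem_flatMap.1 he
    obtain ⟨p, hp, rfl⟩ := List.mem_map.1 he2
    exact ⟨hPre u hu p hp, hu⟩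
  · exact pv_init_inv (PySem.Dict.ofList Wlist).keys (PySem.Dict.nodup_keys_ofList Wlist)
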